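-- pv_equiv track=rewrite | github.com/muhammadfarooq85/CALICO-FALL-2025 | doubleit/templates/doubleit.py | solve
-- ===== SOURCE A (Python) =====
-- def solve(N: int, P: str) -> int:
--     """
--     Return the total money Big Ben pays
--
--     N: length of the string P
--     P: string of characters representing the people Big Ben talks to
--     """
--     # YOUR CODE HERE
--
--     spent = 0
--     wallet = 1
--
--     for person in P:
--         if person == "T":
--             spent += wallet
--             wallet = 1
--         elif person == "D":
--             wallet *= 2
--     return spent
-- ===== SOURCE B (Python) =====
-- def solve(N: int, P: str) -> int:
--     segments = P.split("T")
--     return sum(2 ** seg.count("D") for seg in segments[:-1])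
-- ===== Notes on version B (the rewrite author's own statement) =====
-- stated objective: simpler
-- what changed: Replaces the per-character spent/wallet state machine with a split on 'T': each segment before a T pays 2**(number of D's in it), summed in one expression.
import Mathlib
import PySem

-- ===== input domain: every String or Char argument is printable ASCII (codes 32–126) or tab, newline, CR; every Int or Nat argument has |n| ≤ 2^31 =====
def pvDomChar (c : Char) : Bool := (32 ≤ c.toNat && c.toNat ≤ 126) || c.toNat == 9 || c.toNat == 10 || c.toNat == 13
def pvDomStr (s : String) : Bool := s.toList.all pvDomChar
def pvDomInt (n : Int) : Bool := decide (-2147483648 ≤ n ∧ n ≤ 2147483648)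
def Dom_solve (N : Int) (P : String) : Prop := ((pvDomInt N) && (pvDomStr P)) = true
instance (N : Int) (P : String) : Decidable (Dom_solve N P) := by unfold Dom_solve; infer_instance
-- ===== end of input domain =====

-- B sums 2^(#D's) over the T-delimited segments that precede a T, instead of A's running spent/wallet state machine; same O(N) cost, simpler expression.

-- ===== PORT A =====
def solve (N : Int) (P : String) : Int :=
  (P.toList.foldl (fun st person =>
      if person = 'T' then (st.1 + st.2, (1 : Int))
      else if person = 'D' then (st.1, st.2 * 2)
      else st) ((0 : Int), (1 : Int))).1

-- ===== PORT B =====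
def solve_alt (N : Int) (P : String) : Int :=
  let segments := PySem.Chars.splitOn P.toList ['T']
  ((PySem.List.slice segments none (some (-1))).map
      (fun seg => (2 : Int) ^ PySem.Chars.count seg ['D'])).sum

-- ===== PRECONDITION & SPEC =====
def Spec_solve (N : Int) (P : String) (out : Int) : Prop := out = solve_alt N P
instance (N : Int) (P : String) (out : Int) : Decidable (Spec_solve N P out) := by unfold Spec_solve; infer_instance

-- ===== CLAIM (what is proved, stated in full; the proofs are below) =====
def Claim_equal_solve : Prop := ∀ (N : Int) (P : String), Dom_solve N P → Spec_solve N P (solve N P)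

-- ===== LEMMAS AND PROOFS =====

-- specification of A's loop: total paid starting with wallet w
def pvPays : List Char → Int → Int
  | [], _ => 0
  | c :: cs, w =>
    if c = 'T' then w + pvPays cs 1
    else if c = 'D' then pvPays cs (2 * w)
    else pvPays cs w

lemma solve_foldl_eq (cs : List Char) : ∀ (spent wallet : Int),
    (cs.foldl (fun st person =>
      if person = 'T' then (st.1 + st.2, (1 : Int))
      else if person = 'D' then (st.1, st.2 * 2)
      else st) (spent, wallet)).1 = spent + pvPays cs wallet := by
  induction cs with
  | nil => intro spent wallet; simp [pvPays]
  | cons c cs ih =>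
    intro spent wallet
    by_cases hT : c = 'T'
    · simp [hT, List.foldl_cons, ih, pvPays, add_assoc]
    · by_cases hD : c = 'D'
      · simp [hT, hD, List.foldl_cons, ih, pvPays, mul_comm]
      · simp [hT, hD, List.foldl_cons, ih, pvPays]


-- B's sum, generalized over the first segment's starting wallet
def pvG : List (List Char) → Int → Int
  | [], _ => 0
  | [_], _ => 0
  | s :: rest, w => w * (2 : Int) ^ (s.count 'D') + pvG rest 1

lemma count_go_eq (c : Char) : ∀ (fuel : Nat) (l : List Char) (acc : Nat),
    l.length ≤ fuel → PySem.Chars.count.go [c] fuel l acc = acc + l.count c := by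
  intro fuel
  induction fuel with
  | zero => intro l acc h; cases l with
    | nil => simp [PySem.Chars.count.go]
    | cons x xs => simp at h
  | succ f ih =>
    intro l acc h
    cases l with
    | nil => simp [PySem.Chars.count.go]
    | cons x xs =>
      simp only [List.length_cons, Nat.succ_le_succ_iff] at h
      by_cases hx : c = x
      · subst hx
        simp [PySem.Chars.count.go, List.isPrefixOf, ih _ _ h, List.count_cons]
        omega
      · simp [PySem.Chars.count.go, List.isPrefixOf, Ne.symm hx, hx, ih _ _ h, List.count_cons]

lemma count_singleton (c : Char) (l : List Char) :
    PySem.Chars.count l [c] = l.count c := by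
  simp [PySem.Chars.count]
  rw [count_go_eq c l.length l 0 le_rfl]
  simp

lemma splitOn_go_eq (t : Char) : ∀ (fuel : Nat) (l cur : List Char) (acc : List (List Char)),
    l.length ≤ fuel →
    PySem.Chars.splitOn.go [t] fuel l cur acc =
      acc.reverse ++ (l.splitOnP (· == t)).modifyHead (cur.reverse ++ ·) := by
  intro fuel
  induction fuel with
  | zero => intro l cur acc h; cases l with
    | nil => simp [PySem.Chars.splitOn.go, List.splitOnP_nil]
    | cons x xs => simp at h
  | succ f ih =>
    intro l cur acc h
    cases l with
    | nil => simp [PySem.Chars.splitOn.go, List.splitOnP_nil]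
    | cons x xs =>
      simp only [List.length_cons, Nat.succ_le_succ_iff] at h
      by_cases hx : x = t
      · subst hx
        simp [PySem.Chars.splitOn.go, List.isPrefixOf, ih _ _ _ h, List.splitOnP_cons]
        exact congrFun List.modifyHead_id _
      · simp [PySem.Chars.splitOn.go, List.isPrefixOf, hx, Ne.symm hx, ih _ _ _ h,
          List.splitOnP_cons]
        cases hxs : xs.splitOnP (· == t) with
        | nil => exact absurd hxs (List.splitOnP_ne_nil _ _)
        | cons s rest => simp

lemma splitOn_singleton (t : Char) (l : List Char) :
    PySem.Chars.splitOn l [t] = l.splitOnP (· == t) := by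
  unfold PySem.Chars.splitOn
  rw [splitOn_go_eq t (l.length + 1) l [] [] (by omega)]
  cases h : l.splitOnP (· == t) with
  | nil => exact absurd h (List.splitOnP_ne_nil _ _)
  | cons s rest => simp

lemma pays_eq_G (cs : List Char) : ∀ (w : Int),
    pvPays cs w = pvG (cs.splitOnP (· == 'T')) w := by
  induction cs with
  | nil => intro w; simp [pvPays, List.splitOnP_nil, pvG]
  | cons c cs ih =>
    intro w
    by_cases hT : c = 'T'
    · subst hT
      rw [List.splitOnP_cons]
      simp only [beq_self_eq_true, if_pos]
      cases h : cs.splitOnP (· == 'T') with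
      | nil => exact absurd h (List.splitOnP_ne_nil _ _)
      | cons s rest =>
        simp [pvPays, pvG, ih, h]
    · rw [List.splitOnP_cons]
      simp only [beq_iff_eq, hT, if_neg, if_false]
      cases h : cs.splitOnP (· == 'T') with
      | nil => exact absurd h (List.splitOnP_ne_nil _ _)
      | cons s rest =>
        by_cases hD : c = 'D'
        · subst hD
          cases rest with
          | nil => simp [pvPays, pvG, ih, h, hT]
          | cons s2 rest2 =>
            simp [pvPays, pvG, ih, h, hT, List.count_cons, pow_succ]
            ring
        · cases rest with
          | nil => simp [pvPays, pvG, ih, h, hT, hD]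
          | cons s2 rest2 =>
            simp [pvPays, pvG, ih, h, hT, hD, List.count_cons]

lemma G_eq_sum (L : List (List Char)) :
    pvG L 1 = (L.dropLast.map (fun seg => (2 : Int) ^ (seg.count 'D'))).sum := by
  induction L with
  | nil => simp [pvG]
  | cons s rest ih =>
    cases rest with
    | nil => simp [pvG]
    | cons s2 rest2 =>
      simp only [pvG, List.dropLast_cons₂, List.map_cons, List.sum_cons, ih]
      ring

-- ===== VERDICT (by name: the statement is the Claim_ definition above) =====
theorem solve_spec : Claim_equal_solve := by
  intro N P _
  unfold Spec_solve solve solve_alt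
  rw [solve_foldl_eq]
  simp only [PySem.List.slice_to_neg_one, splitOn_singleton, count_singleton]
  rw [pays_eq_G, G_eq_sum]
  ring
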